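-- pv_equiv track=rewrite | github.com/EL-BID/MapaInversiones | MapaInversiones.ChatBot/app/modules/graph/helpers_sql.py | _find_clause_boundary
-- ===== SOURCE A (Python) =====
-- _CLAUSE_BOUNDARY_KEYWORDS = [
--     "GROUP BY",
--     "ORDER BY",
--     "LIMIT",
--     "OFFSET",
--     "FETCH",
--     "RETURNING",
--     "WINDOW",
--     "UNION",
--     "INTERSECT",
--     "EXCEPT",
-- ]
--
-- def _find_clause_boundary(sql: str, start: int = 0) -> int:
--     """
--     Encuentra límite de cláusula (ORDER BY, LIMIT, etc.) al nivel 0 de paréntesis.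
--
--     Esta función respeta la anidación de paréntesis para evitar matchear keywords
--     dentro de subqueries, funciones WINDOW (OVER), o expresiones EXISTS.
--
--     Args:
--         sql: Query SQL completa
--         start: Posición desde donde comenzar la búsqueda
--
--     Returns:
--         Posición del primer keyword de límite encontrado al nivel 0,
--         o len(sql) si no se encuentra ninguno.
--     """
--     paren_depth = 0
--     i = start
--     sql_upper = sql.upper()
--     n = len(sql)
--
--     while i < n:
--         char = sql[i]
--
--         # Manejar strings literales (saltar contenido entre comillas)
--         # PostgreSQL usa '' para escapar comillas dentro de strings
--         if char == "'":
--             i += 1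
--             while i < n:
--                 if sql[i] == "'":
--                     # Verificar si es quote escapado ''
--                     if i + 1 < n and sql[i + 1] == "'":
--                         i += 2  # Saltar ambas comillas del escape
--                     else:
--                         break  # Fin del string
--                 else:
--                     i += 1
--             i += 1  # Saltar comilla de cierre
--             continue
--
--         if char == "(":
--             paren_depth += 1
--             i += 1
--         elif char == ")":
--             paren_depth = max(0, paren_depth - 1)
--             i += 1
--         elif paren_depth == 0:
--             # Solo buscar keywords cuando estamos fuera de paréntesis
--             remaining = sql_upper[i:]
--             for kw in _CLAUSE_BOUNDARY_KEYWORDS: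
--                 if remaining.startswith(kw):
--                     # Verificar que hay whitespace antes (o estamos al inicio)
--                     if i == 0 or sql[i - 1] in " \t\n\r":
--                         # Verificar que hay whitespace o paréntesis después del keyword
--                         after_pos = i + len(kw)
--                         if after_pos >= n or sql[after_pos] in " \t\n\r(":
--                             return i
--             i += 1
--         else:
--             i += 1
--
--     return n
-- ===== SOURCE B (Python) =====
-- _CLAUSE_BOUNDARY_KEYWORDS = [
--     "GROUP BY",
--     "ORDER BY",
--     "LIMIT",
--     "OFFSET",
--     "FETCH",
--     "RETURNING",
--     "WINDOW",
--     "UNION",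
--     "INTERSECT",
--     "EXCEPT",
-- ]
--
--
-- def _annotate(sql, start):
--     """One pass from `start`: mark[i] is True iff position i is reached at
--     paren depth 0, outside string literals (and is not a paren or quote)."""
--     n = len(sql)
--     mark = [False] * n
--     depth = 0
--     i = start
--     while i < n:
--         c = sql[i]
--         if c == "'":
--             i += 1
--             while i < n:
--                 if sql[i] == "'":
--                     if i + 1 < n and sql[i + 1] == "'":
--                         i += 2
--                     else:
--                         break
--                 else:
--                     i += 1
--             i += 1
--         elif c == "(":
--             depth += 1
--             i += 1
--         elif c == ")":
--             depth = max(0, depth - 1)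
--             i += 1
--         else:
--             if depth == 0:
--                 mark[i] = True
--             i += 1
--     return mark
--
--
-- def _find_clause_boundary(sql, start=0):
--     n = len(sql)
--     mark = _annotate(sql, start)
--     upper = sql.upper()
--
--     def first(kw):
--         # earliest occurrence of kw (at a marked position, word-bounded), else n
--         pos = upper.find(kw, start)
--         while pos != -1:
--             if (mark[pos]
--                     and (pos == 0 or sql[pos - 1] in " \t\n\r")
--                     and (pos + len(kw) >= n or sql[pos + len(kw)] in " \t\n\r(")):
--                 return pos
--             pos = upper.find(kw, pos + 1)
--         return n
--
--     best = n
--     for kw in _CLAUSE_BOUNDARY_KEYWORDS: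
--         best = min(best, first(kw))
--     return best
-- ===== Notes on version B (the rewrite author's own statement) =====
-- stated objective: faster
-- what changed: B replaces A's single interleaved scan (which slices sql_upper[i:] and tries every keyword at each depth-0 position) by an annotation pass marking depth-0 non-string positions, followed by a per-keyword str.find candidate search verified against the marks and word boundaries, returning the minimum over keywords.
-- outside the precondition, e.g. on _find_clause_boundary('LIMIT 1', -2): A returns 0, B returns 7; on _find_clause_boundary('a LIMIT 1', -8): A returns -7, B returns 2
import Mathlib
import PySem

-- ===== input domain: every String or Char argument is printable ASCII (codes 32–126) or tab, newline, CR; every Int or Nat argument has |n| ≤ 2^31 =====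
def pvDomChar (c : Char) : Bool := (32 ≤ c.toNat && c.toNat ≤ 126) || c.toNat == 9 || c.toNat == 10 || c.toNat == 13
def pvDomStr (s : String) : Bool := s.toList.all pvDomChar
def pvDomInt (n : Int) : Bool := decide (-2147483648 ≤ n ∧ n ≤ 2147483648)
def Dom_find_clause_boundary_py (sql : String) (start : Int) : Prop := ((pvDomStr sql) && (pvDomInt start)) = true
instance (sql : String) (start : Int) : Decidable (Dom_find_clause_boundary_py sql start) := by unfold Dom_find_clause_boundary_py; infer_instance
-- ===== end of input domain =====

-- B replaces A's single interleaved scan by an annotation pass (marking depth-0 non-string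
-- positions) followed by a per-keyword find-candidate-then-verify search; measured faster than A
-- (A slices sql_upper[i:] at every depth-0 position); same return value on every nonnegative start.

-- ===== PORT A =====
-- _CLAUSE_BOUNDARY_KEYWORDS (module constant, shared by both Pythons)
def pvKw : List (List Char) :=
  ["GROUP BY".toList, "ORDER BY".toList, "LIMIT".toList, "OFFSET".toList, "FETCH".toList,
   "RETURNING".toList, "WINDOW".toList, "UNION".toList, "INTERSECT".toList, "EXCEPT".toList]

-- `i == 0 or sql[i-1] in " \t\n\r"` (identical condition in both Pythons)
def pvBefore (cs : List Char) (i : Nat) : Bool :=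
  i == 0 || ([' ', '\t', '\n', '\r'].contains (cs.getD (i - 1) ' '))

-- `after_pos >= n or sql[after_pos] in " \t\n\r("` (identical condition in both Pythons)
def pvAfter (cs : List Char) (n i : Nat) (kw : List Char) : Bool :=
  decide (n ≤ i + kw.length) || ([' ', '\t', '\n', '\r', '('].contains (cs.getD (i + kw.length) ' '))

-- A's per-keyword test: `remaining.startswith(kw)` and the two boundary checks
def pvPass (cs csU : List Char) (n : Nat) (kw : List Char) (i : Nat) : Bool :=
  kw.isPrefixOf (csU.drop i) && pvBefore cs i && pvAfter cs n i kw

-- A's inner `while` over a string literal: returns the index of the closing quote (or n)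
def pyASkip (cs : List Char) (n i : Nat) : Nat :=
  if i < n then
    if cs.getD i ' ' = '\'' then
      if i + 1 < n ∧ cs.getD (i + 1) ' ' = '\'' then pyASkip cs n (i + 2) else i
    else pyASkip cs n (i + 1)
  else i
termination_by n - i

theorem pyASkip_ge (cs : List Char) (n i : Nat) : i ≤ pyASkip cs n i := by
  unfold pyASkip
  split
  · split
    · split
      · have := pyASkip_ge cs n (i + 2); omega
      · omega
    · have := pyASkip_ge cs n (i + 1); omega
  · omega
termination_by n - i

-- A's outer while loop (state: paren_depth d, index i)
def pyALoop (cs csU : List Char) (n d i : Nat) : Nat :=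
  if i < n then
    if cs.getD i ' ' = '\'' then pyALoop cs csU n d (pyASkip cs n (i + 1) + 1)
    else if cs.getD i ' ' = '(' then pyALoop cs csU n (d + 1) (i + 1)
    else if cs.getD i ' ' = ')' then pyALoop cs csU n (d - 1) (i + 1)
    else if d = 0 then
      if pvKw.any (fun kw => pvPass cs csU n kw i) then i
      else pyALoop cs csU n d (i + 1)
    else pyALoop cs csU n d (i + 1)
  else n
termination_by n - i
decreasing_by all_goals first
  | omega
  | (have := pyASkip_ge cs n (i + 1); omega)

def find_clause_boundary_py (sql : String) (start : Int) : Int :=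
  let cs := sql.toList
  let csU := PySem.Chars.upper cs
  let n := cs.length
  (pyALoop cs csU n 0 start.toNat : Int)

-- ===== PORT B =====
-- B's inner string-literal while (same code as in Source B's _annotate)
def altSkip (cs : List Char) (n i : Nat) : Nat :=
  if i < n then
    if cs.getD i ' ' = '\'' then
      if i + 1 < n ∧ cs.getD (i + 1) ' ' = '\'' then altSkip cs n (i + 2) else i
    else altSkip cs n (i + 1)
  else i
termination_by n - i

theorem altSkip_ge (cs : List Char) (n i : Nat) : i ≤ altSkip cs n i := by
  unfold altSkip
  split
  · split
    · split
      · have := altSkip_ge cs n (i + 2); omega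
      · omega
    · have := altSkip_ge cs n (i + 1); omega
  · omega
termination_by n - i

-- _annotate: builds the mark array
def altAnnot (cs : List Char) (n d i : Nat) (mark : List Bool) : List Bool :=
  if i < n then
    if cs.getD i ' ' = '\'' then altAnnot cs n d (altSkip cs n (i + 1) + 1) mark
    else if cs.getD i ' ' = '(' then altAnnot cs n (d + 1) (i + 1) mark
    else if cs.getD i ' ' = ')' then altAnnot cs n (d - 1) (i + 1) mark
    else if d = 0 then altAnnot cs n d (i + 1) (mark.set i true)
    else altAnnot cs n d (i + 1) mark
  else mark
termination_by n - i
decreasing_by all_goals first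
  | omega
  | (have := altSkip_ge cs n (i + 1); omega)

-- first(kw): loop over upper.find(kw, pos) candidates, verified against mark and boundaries
-- (the `k ≤ csU.length` guard only makes the recursion total: Python's find returns -1 there too)
def altFirst (cs csU : List Char) (mark : List Bool) (n : Nat) (kw : List Char) (k : Nat) : Nat :=
  if hk : k ≤ csU.length then
    if hr : PySem.Chars.findFrom csU kw (k : Int) none = -1 then n
    else
      if mark.getD (PySem.Chars.findFrom csU kw (k : Int) none).toNat false
          && pvBefore cs (PySem.Chars.findFrom csU kw (k : Int) none).toNat
          && pvAfter cs n (PySem.Chars.findFrom csU kw (k : Int) none).toNat kw then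
        (PySem.Chars.findFrom csU kw (k : Int) none).toNat
      else altFirst cs csU mark n kw ((PySem.Chars.findFrom csU kw (k : Int) none).toNat + 1)
  else n
termination_by csU.length + 1 - k
decreasing_by
  have h := PySem.Chars.findFrom_natCast_spec csU kw k hk hr
  omega

def find_clause_boundary_py_alt (sql : String) (start : Int) : Int :=
  let cs := sql.toList
  let n := cs.length
  let mark := altAnnot cs n 0 start.toNat (List.replicate n false)
  let csU := PySem.Chars.upper cs
  let best : Nat := pvKw.foldl (fun b kw => min b (altFirst cs csU mark n kw start.toNat)) n
  (best : Int)

-- ===== PRECONDITION & SPEC =====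
-- Pre_ restricts to the function's natural domain of nonnegative start positions: for
-- start < -len(sql) A raises IndexError, and for -len(sql) <= start < 0 A's Python
-- negative-index wraparound scans the string's tail before its head and can return negative
-- positions (or raise) — behaviour outside the function's purpose, which B does not mirror.
def Pre_find_clause_boundary_py (sql : String) (start : Int) : Prop := 0 ≤ start
instance (sql : String) (start : Int) : Decidable (Pre_find_clause_boundary_py sql start) := by
  unfold Pre_find_clause_boundary_py; infer_instance

def pvWitness_find_clause_boundary_py : String × Int := ("SELECT a FROM t ORDER BY a LIMIT 1", 0)

def Spec_find_clause_boundary_py (sql : String) (start : Int) (out : Int) : Prop :=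
  out = find_clause_boundary_py_alt sql start
instance (sql : String) (start : Int) (out : Int) : Decidable (Spec_find_clause_boundary_py sql start out) := by
  unfold Spec_find_clause_boundary_py; infer_instance

-- ===== CLAIM (what is proved, stated in full; the proofs are below) =====
def Claim_equal_find_clause_boundary_py : Prop :=
  ∀ (sql : String) (start : Int), Dom_find_clause_boundary_py sql start →
    Pre_find_clause_boundary_py sql start →
    Spec_find_clause_boundary_py sql start (find_clause_boundary_py sql start)

-- ===== LEMMAS AND PROOFS =====

theorem pvAnd {a b : Bool} (h : (a && b) = true) : a = true ∧ b = true := by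
  simpa using h

theorem foldl_congr' {α β : Type} (l : List α) (f g : β → α → β) (b : β)
    (h : ∀ (b' : β) (x : α), x ∈ l → f b' x = g b' x) : l.foldl f b = l.foldl g b := by
  induction l generalizing b with
  | nil => rfl
  | cons x t ih =>
    rw [List.foldl_cons, List.foldl_cons, h b x (List.mem_cons_self ..)]
    exact ih _ (fun b' y hy => h b' y (List.mem_cons_of_mem _ hy))

theorem altSkip_eq (cs : List Char) (n i : Nat) : altSkip cs n i = pyASkip cs n i := by
  unfold altSkip pyASkip
  split
  · split
    · split
      · exact altSkip_eq cs n (i + 2)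
      · rfl
    · exact altSkip_eq cs n (i + 1)
  · rfl
termination_by n - i

-- the (increasing) list of positions at which the scan performs its depth-0 keyword check
def visitList (cs : List Char) (n d i : Nat) : List Nat :=
  if i < n then
    if cs.getD i ' ' = '\'' then visitList cs n d (pyASkip cs n (i + 1) + 1)
    else if cs.getD i ' ' = '(' then visitList cs n (d + 1) (i + 1)
    else if cs.getD i ' ' = ')' then visitList cs n (d - 1) (i + 1)
    else if d = 0 then i :: visitList cs n d (i + 1)
    else visitList cs n d (i + 1)
  else []
termination_by n - i
decreasing_by all_goals first
  | omega
  | (have := pyASkip_ge cs n (i + 1); omega)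

theorem visit_mem (cs : List Char) (n d i : Nat) :
    ∀ p ∈ visitList cs n d i, i ≤ p ∧ p < n := by
  intro p hp
  unfold visitList at hp
  split at hp
  · split at hp
    · have := visit_mem cs n d (pyASkip cs n (i + 1) + 1) p hp
      have := pyASkip_ge cs n (i + 1); omega
    · split at hp
      · have := visit_mem cs n (d + 1) (i + 1) p hp; omega
      · split at hp
        · have := visit_mem cs n (d - 1) (i + 1) p hp; omega
        · split at hp
          · rcases List.mem_cons.mp hp with h | h
            · omega
            · have := visit_mem cs n d (i + 1) p h; omega
          · have := visit_mem cs n d (i + 1) p hp; omega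
  · simp at hp
termination_by n - i
decreasing_by all_goals first
  | omega
  | (have := pyASkip_ge cs n (i + 1); omega)

theorem visit_pairwise (cs : List Char) (n d i : Nat) :
    (visitList cs n d i).Pairwise (· < ·) := by
  unfold visitList
  split
  · split
    · exact visit_pairwise cs n d (pyASkip cs n (i + 1) + 1)
    · split
      · exact visit_pairwise cs n (d + 1) (i + 1)
      · split
        · exact visit_pairwise cs n (d - 1) (i + 1)
        · split
          · refine List.pairwise_cons.mpr ⟨?_, visit_pairwise cs n d (i + 1)⟩
            intro q hq
            have := visit_mem cs n d (i + 1) q hq; omega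
          · exact visit_pairwise cs n d (i + 1)
  · exact List.Pairwise.nil
termination_by n - i
decreasing_by all_goals first
  | omega
  | (have := pyASkip_ge cs n (i + 1); omega)

theorem pyALoop_eq (cs csU : List Char) (n d i : Nat) :
    pyALoop cs csU n d i =
      ((visitList cs n d i).filter (fun p => pvKw.any (fun kw => pvPass cs csU n kw p))).head?.getD n := by
  unfold pyALoop visitList
  split
  · split
    · exact pyALoop_eq cs csU n d (pyASkip cs n (i + 1) + 1)
    · split
      · exact pyALoop_eq cs csU n (d + 1) (i + 1)
      · split
        · exact pyALoop_eq cs csU n (d - 1) (i + 1)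
        · split
          · rw [List.filter_cons]
            split
            · simp
            · exact pyALoop_eq cs csU n d (i + 1)
          · exact pyALoop_eq cs csU n d (i + 1)
  · simp
termination_by n - i
decreasing_by all_goals first
  | omega
  | (have := pyASkip_ge cs n (i + 1); omega)

theorem altAnnot_eq (cs : List Char) (n d i : Nat) (mark : List Bool) :
    altAnnot cs n d i mark = (visitList cs n d i).foldl (fun m p => m.set p true) mark := by
  unfold altAnnot visitList
  split
  · rw [altSkip_eq]
    split
    · exact altAnnot_eq cs n d (pyASkip cs n (i + 1) + 1) mark
    · split
      · exact altAnnot_eq cs n (d + 1) (i + 1) mark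
      · split
        · exact altAnnot_eq cs n (d - 1) (i + 1) mark
        · split
          · rw [List.foldl_cons]; exact altAnnot_eq cs n d (i + 1) (mark.set i true)
          · exact altAnnot_eq cs n d (i + 1) mark
  · rfl
termination_by n - i
decreasing_by all_goals first
  | omega
  | (have := pyASkip_ge cs n (i + 1); omega)

theorem foldl_set_getD (l : List Nat) :
    ∀ (mark : List Bool) (p : Nat), (∀ q ∈ l, q < mark.length) →
      (l.foldl (fun m q => m.set q true) mark).getD p false
        = (mark.getD p false || decide (p ∈ l)) := by
  induction l with
  | nil => intro mark p _; simp
  | cons q t ih =>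
    intro mark p hq
    rw [List.foldl_cons, ih (mark.set q true) p
      (by simp only [List.length_set]; intro x hx; exact hq x (List.mem_cons_of_mem _ hx))]
    simp only [List.getD, List.getElem?_set, List.mem_cons]
    by_cases hpq : p = q
    · subst hpq
      have hp : p < mark.length := hq p (List.mem_cons_self ..)
      simp [hp]
    · simp [Ne.symm hpq, hpq]

theorem head?_eq_of_min (l : List Nat) (pos : Nat) (hpw : l.Pairwise (· < ·))
    (hmem : pos ∈ l) (hmin : ∀ q ∈ l, pos ≤ q) : l.head? = some pos := by
  cases l with
  | nil => simp at hmem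
  | cons x t =>
    rcases List.mem_cons.mp hmem with h | h
    · simp [h]
    · exfalso
      have hx : x < pos := (List.pairwise_cons.mp hpw).1 pos h
      have := hmin x (List.mem_cons_self ..)
      omega

theorem prefix_drop_infix {kw csU : List Char} {k q : Nat} (hkq : k ≤ q)
    (h : kw <+: csU.drop q) : kw <:+: csU.drop k := by
  have h1 : csU.drop q <:+ csU.drop k := by
    have : (csU.drop k).drop (q - k) = csU.drop q := by
      rw [List.drop_drop]; congr 1; omega
    rw [← this]; exact List.drop_suffix _ _
  exact h.isInfix.trans h1.isInfix

-- characterization of altFirst on the final mark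
theorem altFirst_eq (cs csU : List Char) (n : Nat) (L : List Nat) (markF : List Bool)
    (kw : List Char)
    (hmark : ∀ p, markF.getD p false = decide (p ∈ L))
    (hLb : ∀ p ∈ L, p < n)
    (hLpw : L.Pairwise (· < ·))
    (hlen : csU.length = n) :
    ∀ k, altFirst cs csU markF n kw k
      = ((L.filter (fun p => pvPass cs csU n kw p)).filter (fun p => decide (k ≤ p))).head?.getD n := by
  intro k
  unfold altFirst
  split
  · rename_i hk
    split
    · rename_i hr
      -- no occurrence of kw at or after k: the filtered list is empty
      have hno : ∀ q, k ≤ q → ¬ kw <+: csU.drop q := by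
        intro q hq hpref
        have : kw <:+: csU.drop k := prefix_drop_infix hq hpref
        exact (PySem.Chars.findFrom_natCast_eq_neg_one_iff csU kw k hk).mp hr this
      have : ((L.filter (fun p => pvPass cs csU n kw p)).filter (fun p => decide (k ≤ p))) = [] := by
        rw [List.filter_eq_nil_iff]
        intro q hq hkle
        have hq1 := List.mem_filter.mp hq
        have hpass := hq1.2
        unfold pvPass at hpass
        have hpref : kw <+: csU.drop q := by
          have := (pvAnd (pvAnd hpass).1).1
          exact List.isPrefixOf_iff_prefix.mp this
        exact hno q (by simpa using hkle) hpref
      rw [this]; rfl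
    · rename_i hr
      obtain ⟨hk1, hpref, hmin⟩ := PySem.Chars.findFrom_natCast_spec csU kw k hk hr
      set r := PySem.Chars.findFrom csU kw (k : Int) none with hrdef
      have hkpos : k ≤ r.toNat := by omega
      split
      · rename_i hcond
        -- pos passes: it is the head of the filtered list
        have hmem : r.toNat ∈ L := by
          have := hmark r.toNat
          rw [(pvAnd (pvAnd hcond).1).1] at this
          exact of_decide_eq_true this.symm
        have hpassr : pvPass cs csU n kw r.toNat = true := by
          unfold pvPass
          rw [List.isPrefixOf_iff_prefix.mpr hpref,
            (pvAnd (pvAnd hcond).1).2,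
            (pvAnd hcond).2]
          rfl
        have hmemf : r.toNat ∈ ((L.filter (fun p => pvPass cs csU n kw p)).filter (fun p => decide (k ≤ p))) := by
          rw [List.mem_filter, List.mem_filter]
          exact ⟨⟨hmem, hpassr⟩, by simpa using hkpos⟩
        have hpwf : ((L.filter (fun p => pvPass cs csU n kw p)).filter (fun p => decide (k ≤ p))).Pairwise (· < ·) :=
          (hLpw.filter _).filter _
        have hminf : ∀ q ∈ ((L.filter (fun p => pvPass cs csU n kw p)).filter (fun p => decide (k ≤ p))), r.toNat ≤ q := by
          intro q hq
          have hq1 := List.mem_filter.mp hq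
          have hq2 := List.mem_filter.mp hq1.1
          have hkq : k ≤ q := by simpa using hq1.2
          have hprefq : kw <+: csU.drop q := by
            have := (pvAnd (pvAnd hq2.2).1).1
            exact List.isPrefixOf_iff_prefix.mp this
          by_contra hlt
          exact hmin q hkq (by omega) hprefq
        rw [head?_eq_of_min _ _ hpwf hmemf hminf]; rfl
      · rename_i hcond
        -- pos fails: no passing element in [k, pos]; restart from pos+1
        rw [altFirst_eq cs csU n L markF kw hmark hLb hLpw hlen (r.toNat + 1)]
        congr 2
        apply List.filter_congr
        intro q hq
        have hq1 := List.mem_filter.mp hq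
        have hprefq : kw <+: csU.drop q := by
          have := (pvAnd (pvAnd hq1.2).1).1
          exact List.isPrefixOf_iff_prefix.mp this
        have hbq : (pvBefore cs q && pvAfter cs n q kw) = true := by
          have h1 := (pvAnd (pvAnd hq1.2).1).2
          have h2 := (pvAnd hq1.2).2
          rw [h1, h2]; rfl
        simp only [decide_eq_decide]
        constructor
        · intro hkq; omega
        · intro hkq
          have hge : r.toNat ≤ q := by
            by_contra hlt
            exact hmin q hkq (by omega) hprefq
          rcases Nat.eq_or_lt_of_le hge with heq | hlt
          · exfalso
            apply hcond
            rw [← heq] at hq1 hbq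
            have : markF.getD r.toNat false = true := by
              rw [hmark]; exact decide_eq_true hq1.1
            rw [this, Bool.true_and]
            exact hbq
          · omega
  · -- k > csU.length = n: every element of L is < n < k
    have : ((L.filter (fun p => pvPass cs csU n kw p)).filter (fun p => decide (k ≤ p))) = [] := by
      rw [List.filter_eq_nil_iff]
      intro q hq hkle
      have hq1 := List.mem_filter.mp hq
      have := hLb q hq1.1
      rename_i hk
      have : k ≤ q := by simpa using hkle
      omega
    rw [this]; rfl
termination_by k => csU.length + 1 - k
decreasing_by
  have := PySem.Chars.findFrom_natCast_spec csU kw k (by assumption) (by assumption)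
  omega

-- fold-min bounds
theorem fold_min_le_init {α : Type} (ks : List α) (G : α → Nat) (b : Nat) :
    ks.foldl (fun b k => min b (G k)) b ≤ b := by
  induction ks generalizing b with
  | nil => simp
  | cons k t ih => exact le_trans (ih (min b (G k))) (Nat.min_le_left _ _)

theorem fold_min_le {α : Type} (ks : List α) (G : α → Nat) (b : Nat) :
    ∀ k ∈ ks, ks.foldl (fun b k => min b (G k)) b ≤ G k := by
  induction ks generalizing b with
  | nil => intro k h; simp at h
  | cons k0 t ih =>
    intro k hk
    rcases List.mem_cons.mp hk with h | h
    · subst h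
      exact le_trans (fold_min_le_init t G _) (Nat.min_le_right _ _)
    · exact ih (min b (G k0)) k h

theorem le_fold_min {α : Type} (ks : List α) (G : α → Nat) (b c : Nat)
    (hb : c ≤ b) (hG : ∀ k ∈ ks, c ≤ G k) :
    c ≤ ks.foldl (fun b k => min b (G k)) b := by
  induction ks generalizing b with
  | nil => simpa
  | cons k t ih =>
    exact ih (min b (G k)) (le_min hb (hG k (List.mem_cons_self ..)))
      (fun k' hk' => hG k' (List.mem_cons_of_mem _ hk'))

theorem head?_filter_ge {l : List Nat} {g : Nat → Bool} {p n : Nat}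
    (hl : ∀ q ∈ l, p < q) (hpn : p < n) : p ≤ (l.filter g).head?.getD n := by
  cases hh : (l.filter g).head? with
  | none => simpa using Nat.le_of_lt hpn
  | some q =>
    have hq : q ∈ l.filter g := List.mem_of_mem_head? (by rw [Option.mem_def, hh])
    have := hl q (List.mem_filter.mp hq).1
    simpa [hh] using Nat.le_of_lt this

-- min over keywords of per-keyword first hits = first hit of the union, on a sorted bounded list
theorem bridge {α : Type} (ks : List α) (P : α → Nat → Bool) (n : Nat) :
    ∀ (l : List Nat), l.Pairwise (· < ·) → (∀ p ∈ l, p < n) →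
      ks.foldl (fun b kw => min b ((l.filter (fun p => P kw p)).head?.getD n)) n
        = (l.filter (fun p => ks.any (fun kw => P kw p))).head?.getD n := by
  intro l
  induction l with
  | nil =>
    intro _ _
    simp only [List.filter_nil, List.head?_nil, Option.getD_none]
    refine Nat.le_antisymm (fold_min_le_init ks _ n) (le_fold_min ks _ n n le_rfl ?_)
    intro k _; simp
  | cons p t ih =>
    intro hpw hb
    have hp : p < n := hb p (List.mem_cons_self ..)
    have ht : ∀ q ∈ t, p < q := (List.pairwise_cons.mp hpw).1
    by_cases ha : ks.any (fun kw => P kw p)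
    · -- p is the overall answer
      rw [List.filter_cons_of_pos (by simpa using ha)]
      simp only [List.head?_cons, Option.getD_some]
      obtain ⟨kw0, hkw0, hP0⟩ := List.any_eq_true.mp ha
      refine Nat.le_antisymm ?_ ?_
      · have : ((p :: t).filter (fun q => P kw0 q)).head?.getD n = p := by
          rw [List.filter_cons_of_pos hP0]; rfl
        calc ks.foldl (fun b kw => min b (((p :: t).filter (fun q => P kw q)).head?.getD n)) n
            ≤ ((p :: t).filter (fun q => P kw0 q)).head?.getD n := fold_min_le ks _ n kw0 hkw0
          _ = p := this
      · refine le_fold_min ks _ n p (Nat.le_of_lt hp) ?_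
        intro kw _
        rw [List.filter_cons]
        split
        · simp
        · exact head?_filter_ge ht hp
    · -- p passes no keyword: discard it on both sides
      rw [List.filter_cons_of_neg (by simpa using ha)]
      have hnone : ∀ kw ∈ ks, P kw p = false := by
        intro kw hkw
        rcases Bool.eq_false_or_eq_true (P kw p) with h | h
        · exact absurd (List.any_eq_true.mpr ⟨kw, hkw, h⟩) ha
        · exact h
      have : ks.foldl (fun b kw => min b (((p :: t).filter (fun q => P kw q)).head?.getD n)) n
          = ks.foldl (fun b kw => min b ((t.filter (fun q => P kw q)).head?.getD n)) n := by
        apply foldl_congr'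
        intro b kw hkw
        rw [List.filter_cons_of_neg (by simp [hnone kw hkw])]
      rw [this]
      exact ih (List.pairwise_cons.mp hpw).2 (fun q hq => hb q (List.mem_cons_of_mem _ hq))

theorem length_upper (cs : List Char) : (PySem.Chars.upper cs).length = cs.length := by
  simp [PySem.Chars.upper]

theorem main_nat (cs : List Char) (s0 : Nat) :
    pyALoop cs (PySem.Chars.upper cs) cs.length 0 s0
      = pvKw.foldl (fun b kw => min b (altFirst cs (PySem.Chars.upper cs)
          (altAnnot cs cs.length 0 s0 (List.replicate cs.length false)) cs.length kw s0)) cs.length := by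
  set csU := PySem.Chars.upper cs with hcsU
  set n := cs.length with hn
  set L := visitList cs n 0 s0 with hL
  have hLb : ∀ p ∈ L, p < n := fun p hp => (visit_mem cs n 0 s0 p hp).2
  have hLlo : ∀ p ∈ L, s0 ≤ p := fun p hp => (visit_mem cs n 0 s0 p hp).1
  have hLpw : L.Pairwise (· < ·) := visit_pairwise cs n 0 s0
  have hlen : csU.length = n := length_upper cs
  -- the final mark characterizes membership in L
  have hmarkF : altAnnot cs n 0 s0 (List.replicate n false) = L.foldl (fun m p => m.set p true) (List.replicate n false) :=
    altAnnot_eq cs n 0 s0 _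
  have hmark : ∀ p, (altAnnot cs n 0 s0 (List.replicate n false)).getD p false = decide (p ∈ L) := by
    intro p
    rw [hmarkF, foldl_set_getD L (List.replicate n false) p (by intro q hq; simpa using hLb q hq)]
    have : (List.replicate n false).getD p false = false := by
      simp [List.getD, List.getElem?_replicate]
      split <;> simp
    rw [this, Bool.false_or]
  -- A's side
  rw [pyALoop_eq cs csU n 0 s0]
  -- B's side: each altFirst is the per-keyword first hit over L
  have hB : ∀ kw, altFirst cs csU (altAnnot cs n 0 s0 (List.replicate n false)) n kw s0
      = ((L.filter (fun p => pvPass cs csU n kw p)).head?.getD n) := by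
    intro kw
    rw [altFirst_eq cs csU n L _ kw hmark hLb hLpw hlen s0]
    have : (L.filter (fun p => pvPass cs csU n kw p)).filter (fun p => decide (s0 ≤ p))
        = L.filter (fun p => pvPass cs csU n kw p) := by
      rw [List.filter_filter]
      apply List.filter_congr
      intro q hq
      simp [hLlo q hq]
    rw [this]
  have : pvKw.foldl (fun b kw => min b (altFirst cs csU (altAnnot cs n 0 s0 (List.replicate n false)) n kw s0)) n
      = pvKw.foldl (fun b kw => min b ((L.filter (fun p => pvPass cs csU n kw p)).head?.getD n)) n := by
    apply foldl_congr'
    intro b kw _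
    rw [hB kw]
  rw [this, bridge pvKw (fun kw p => pvPass cs csU n kw p) n L hLpw hLb]

-- ===== VERDICT (by name: the statement is the Claim_ definition above) =====
theorem find_clause_boundary_py_spec : Claim_equal_find_clause_boundary_py := by
  intro sql start _ _
  unfold Spec_find_clause_boundary_py find_clause_boundary_py find_clause_boundary_py_alt
  exact congrArg (Nat.cast : Nat → Int) (main_nat sql.toList start.toNat)
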